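-- pv_equiv track=rewrite | github.com/AlekseevValeriy/Journey-to-the-Land-of-Magic | Version 1/DONTNEED/DONTNEED/map_generate_1_var.py | matrix_completion
-- ===== SOURCE A (Python) =====
-- def matrix_completion(name_2, x_position, y_position, scale, any_matrix, counter=1):  # наполнение
--     while scale != 0:
--         for r in range(len(any_matrix)):
--             if r in range(y_position - counter, sum([y_position, counter, 1])):
--                 for c in range(len(any_matrix[0])):
--                     if c in range(x_position - counter, sum([x_position, counter, 1])):
--                         if any_matrix[r][c] == '_':
--                             any_matrix[r][c] = f'{name_2.rstrip("123456780")}{scale - 1}'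
--         scale -= 1
--         counter += 1
--     return any_matrix
-- ===== SOURCE B (Python) =====
-- def matrix_completion(name_2, x_position, y_position, scale, any_matrix, counter=1):
--     # Closed form: a '_' cell at Chebyshev-style distance d = max(|r-y|,|c-x|) is first
--     # reached at ring k = max(0, d - counter) and gets label scale-1-k; one pass suffices.
--     # Mutates any_matrix in place and returns it, like the original.
--     if scale > 0 and any_matrix:
--         prefix = name_2.rstrip("123456780")
--         width = len(any_matrix[0])
--         reach = counter + scale - 1
--         for r, row in enumerate(any_matrix):
--             dr = abs(r - y_position)
--             if dr > reach:
--                 continue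
--             for c in range(width):
--                 d = max(dr, abs(c - x_position))
--                 if d <= reach and row[c] == '_':
--                     row[c] = f'{prefix}{scale - 1 - max(0, d - counter)}'
--     return any_matrix
-- ===== Notes on version B (the rewrite author's own statement) =====
-- stated objective: alternative
-- what changed: A repeats a full matrix sweep for each of the scale shells; B makes one pass over the matrix and assigns each blank cell its label from the closed form scale-1-max(0, max(|r-y|,|c-x|)-counter).
import Mathlib
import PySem

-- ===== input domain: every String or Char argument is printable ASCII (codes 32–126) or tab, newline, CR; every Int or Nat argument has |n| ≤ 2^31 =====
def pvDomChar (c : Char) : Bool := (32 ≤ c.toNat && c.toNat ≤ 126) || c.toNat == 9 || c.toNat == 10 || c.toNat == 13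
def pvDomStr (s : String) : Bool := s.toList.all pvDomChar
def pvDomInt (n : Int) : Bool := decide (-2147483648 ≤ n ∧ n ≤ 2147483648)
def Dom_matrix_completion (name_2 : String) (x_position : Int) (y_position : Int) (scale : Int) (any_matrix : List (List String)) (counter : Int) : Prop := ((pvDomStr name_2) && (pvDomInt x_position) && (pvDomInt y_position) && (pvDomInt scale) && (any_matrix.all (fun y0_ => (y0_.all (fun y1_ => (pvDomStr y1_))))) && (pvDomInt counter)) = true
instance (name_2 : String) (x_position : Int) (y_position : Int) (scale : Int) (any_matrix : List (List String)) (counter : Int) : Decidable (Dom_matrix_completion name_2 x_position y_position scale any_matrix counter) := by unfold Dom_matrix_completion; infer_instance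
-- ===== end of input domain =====

-- B replaces A's per-shell full-matrix sweeps by one pass with the closed-form label
-- scale-1-max(0, max(|r-y|,|c-x|)-counter) (objective: alternative algorithm).  Python A mutates
-- any_matrix in place and returns it; Python B performs the same in-place mutation.

-- common helper: exact port of Python str.rstrip(chars) (PySem has no rstrip-with-chars):
-- remove the trailing characters of s that occur in chars
def pyRstrip (s : String) (chars : String) : String :=
  String.ofList ((s.toList.reverse.dropWhile (fun ch => chars.toList.contains ch)).reverse)

-- ===== PORT A =====
-- one iteration of A's while-loop body (the full double sweep over the matrix)
def aPass (name_2 : String) (x_position y_position counter scale : Int) (m : List (List String)) : List (List String) :=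
  let w := (m.headD []).length   -- len(any_matrix[0]); row lengths never change during the pass
  m.mapIdx (fun r row =>
    if y_position - counter ≤ (r : Int) ∧ (r : Int) < y_position + counter + 1 then
      row.mapIdx (fun c cell =>
        if c < w ∧ x_position - counter ≤ (c : Int) ∧ (c : Int) < x_position + counter + 1 then
          (if cell = "_" then pyRstrip name_2 "123456780" ++ PySem.Int.toStr (scale - 1) else cell)
        else cell)
    else row)

-- the while-loop; Python diverges for scale < 0 (excluded by Pre_), here that guard returns m
def aLoop (name_2 : String) (x_position y_position : Int) (scale : Int) (m : List (List String)) (counter : Int) : List (List String) :=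
  if scale ≤ 0 then m
  else aLoop name_2 x_position y_position (scale - 1) (aPass name_2 x_position y_position counter scale m) (counter + 1)
termination_by scale.toNat
decreasing_by omega

def matrix_completion (name_2 : String) (x_position : Int) (y_position : Int) (scale : Int) (any_matrix : List (List String)) (counter : Int) : List (List String) :=
  aLoop name_2 x_position y_position scale any_matrix counter

-- ===== PORT B =====
def matrix_completion_alt (name_2 : String) (x_position : Int) (y_position : Int) (scale : Int) (any_matrix : List (List String)) (counter : Int) : List (List String) :=
  if 0 < scale ∧ any_matrix ≠ [] then
    let pfx := pyRstrip name_2 "123456780"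
    let w := (any_matrix.headD []).length
    let reach := counter + scale - 1
    any_matrix.mapIdx (fun r row =>
      if |(r : Int) - y_position| ≤ reach then
        row.mapIdx (fun c cell =>
          if c < w then
            (if max |(r : Int) - y_position| |(c : Int) - x_position| ≤ reach ∧ cell = "_" then
              pfx ++ PySem.Int.toStr (scale - 1 - max 0 (max |(r : Int) - y_position| |(c : Int) - x_position| - counter))
            else cell)
          else cell)
      else row)
  else any_matrix

-- ===== PRECONDITION & SPEC =====
-- Pre_ excludes exactly the inputs on which Python A does not return: scale < 0 (the while-loop
-- never terminates) and ragged matrices where a cell with column index < len(row 0) inside the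
-- maximal square band lies beyond its own row's length (IndexError).
def Pre_matrix_completion (name_2 : String) (x_position : Int) (y_position : Int) (scale : Int) (any_matrix : List (List String)) (counter : Int) : Prop :=
  0 ≤ scale ∧ (0 < scale →
    ∀ r < any_matrix.length, ∀ c < (any_matrix.headD []).length,
      max |(r : Int) - y_position| |(c : Int) - x_position| ≤ counter + scale - 1 →
      c < (any_matrix.getD r []).length)
instance (name_2 : String) (x_position : Int) (y_position : Int) (scale : Int) (any_matrix : List (List String)) (counter : Int) : Decidable (Pre_matrix_completion name_2 x_position y_position scale any_matrix counter) := by unfold Pre_matrix_completion; infer_instance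

def pvWitness_matrix_completion : String × Int × Int × Int × List (List String) × Int :=
  ("N", 1, 1, 2, [["_", "_", "_"], ["_", "a", "_"], ["_", "_", "_"]], 1)

def Spec_matrix_completion (name_2 : String) (x_position : Int) (y_position : Int) (scale : Int) (any_matrix : List (List String)) (counter : Int) (out : List (List String)) : Prop := out = matrix_completion_alt name_2 x_position y_position scale any_matrix counter
instance (name_2 : String) (x_position : Int) (y_position : Int) (scale : Int) (any_matrix : List (List String)) (counter : Int) (out : List (List String)) : Decidable (Spec_matrix_completion name_2 x_position y_position scale any_matrix counter out) := by unfold Spec_matrix_completion; infer_instance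

-- ===== CLAIM (what is proved, stated in full; the proofs are below) =====
def Claim_equal_matrix_completion : Prop := ∀ (name_2 : String) (x_position : Int) (y_position : Int) (scale : Int) (any_matrix : List (List String)) (counter : Int), Dom_matrix_completion name_2 x_position y_position scale any_matrix counter → Pre_matrix_completion name_2 x_position y_position scale any_matrix counter → Spec_matrix_completion name_2 x_position y_position scale any_matrix counter (matrix_completion name_2 x_position y_position scale any_matrix counter)

-- ===== LEMMAS AND PROOFS =====

-- the value cell (r,c) holds after the whole process (shared characterisation of both ports)
def pvCell (name_2 : String) (x_position y_position scale counter : Int) (w : Nat) (r c : Nat) (cell : String) : String :=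
  if c < w ∧ cell = "_" ∧ 0 < scale ∧ max |(r : Int) - y_position| |(c : Int) - x_position| ≤ counter + scale - 1 then
    pyRstrip name_2 "123456780" ++ PySem.Int.toStr (scale - 1 - max 0 (max |(r : Int) - y_position| |(c : Int) - x_position| - counter))
  else cell

theorem pv_headD_eq_getD_zero {α : Type} (l : List α) (d : α) : l.headD d = l.getD 0 d := by
  cases l <;> rfl

theorem pv_mem_toDigitsCore (b : Nat) : ∀ (f n : Nat) (acc : List Char) (ch : Char),
    ch ∈ Nat.toDigitsCore b f n acc → ch ∈ acc ∨ ∃ m, ch = Nat.digitChar m := by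
  intro f
  induction f with
  | zero => intro n acc ch h; exact Or.inl h
  | succ f ih =>
    intro n acc ch h
    simp only [Nat.toDigitsCore] at h
    split at h
    · rcases List.mem_cons.mp h with h | h
      · exact Or.inr ⟨n % b, h⟩
      · exact Or.inl h
    · rcases ih _ _ _ h with h | h
      · rcases List.mem_cons.mp h with h | h
        · exact Or.inr ⟨n % b, h⟩
        · exact Or.inl h
      · exact Or.inr h

theorem pv_digitChar_ne_underscore (m : Nat) : Nat.digitChar m ≠ '_' := by
  rcases Nat.lt_or_ge m 16 with h | h
  · interval_cases m <;> decide
  · have he : Nat.digitChar m = '*' := by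
      unfold Nat.digitChar
      repeat rw [if_neg (by omega)]
    rw [he]; decide

theorem pv_underscore_not_mem_toChars (k : Int) : '_' ∉ PySem.Int.toChars k := by
  intro h
  unfold PySem.Int.toChars at h
  split at h
  · rw [List.mem_cons] at h
    rcases h with h | h
    · exact (by decide : ('_' : Char) ≠ '-') h
    · rcases pv_mem_toDigitsCore 10 _ _ _ _ h with h | ⟨m, hm⟩
      · simp at h
      · exact pv_digitChar_ne_underscore m hm.symm
  · rcases pv_mem_toDigitsCore 10 _ _ _ _ h with h | ⟨m, hm⟩
    · simp at h
    · exact pv_digitChar_ne_underscore m hm.symm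

theorem pv_toDigitsCore_length (b : Nat) : ∀ (f n : Nat) (acc : List Char), 0 < f →
    acc.length < (Nat.toDigitsCore b f n acc).length := by
  intro f
  induction f with
  | zero => intro n acc h; omega
  | succ f ih =>
    intro n acc _
    simp only [Nat.toDigitsCore]
    split
    · simp
    · rcases Nat.eq_zero_or_pos f with hf | hf
      · subst hf; simp [Nat.toDigitsCore]
      · have := ih (n / b) (Nat.digitChar (n % b) :: acc) hf
        simp at this ⊢; omega

theorem pv_toChars_ne_nil (k : Int) : PySem.Int.toChars k ≠ [] := by
  unfold PySem.Int.toChars Nat.toDigits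
  split
  · simp
  · intro h
    have := pv_toDigitsCore_length 10 (Int.toNat k + 1) (Int.toNat k) [] (by omega)
    rw [h] at this; simp at this

theorem pv_label_ne_underscore (name_2 : String) (k : Int) :
    pyRstrip name_2 "123456780" ++ PySem.Int.toStr k ≠ "_" := by
  intro h
  have h' : (pyRstrip name_2 "123456780" ++ PySem.Int.toStr k).toList = ("_" : String).toList := by rw [h]
  rw [String.toList_append, PySem.Int.toList_toStr] at h'
  rcases hl : (pyRstrip name_2 "123456780").toList with _ | ⟨a, l⟩
  · rw [hl] at h'
    simp at h'
    exact pv_underscore_not_mem_toChars k (by rw [h']; exact List.mem_singleton_self _)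
  · rw [hl] at h'
    have : a :: (l ++ PySem.Int.toChars k) = ['_'] := by simpa using h'
    have h2 : l ++ PySem.Int.toChars k = [] := by
      have := congrArg List.length this; simp at this; simp; omega
    exact pv_toChars_ne_nil k (List.append_eq_nil_iff.mp h2).2

-- shape preservation
theorem aPass_length (n2 : String) (x y ct s : Int) (m : List (List String)) :
    (aPass n2 x y ct s m).length = m.length := by
  simp [aPass]

theorem aPass_getD_length (n2 : String) (x y ct s : Int) (m : List (List String)) (r : Nat) :
    ((aPass n2 x y ct s m).getD r []).length = (m.getD r []).length := by
  by_cases hr : r < m.length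
  · rw [List.getD_eq_getElem _ _ (by rw [aPass_length]; exact hr), List.getD_eq_getElem _ _ hr]
    simp only [aPass, List.getElem_mapIdx]
    split <;> simp
  · rw [List.getD_eq_default _ _ (by rw [aPass_length]; omega), List.getD_eq_default _ _ (by omega)]

theorem aPass_headD_length (n2 : String) (x y ct s : Int) (m : List (List String)) :
    ((aPass n2 x y ct s m).headD []).length = ((m.headD []) : List String).length := by
  rw [pv_headD_eq_getD_zero, pv_headD_eq_getD_zero]
  exact aPass_getD_length n2 x y ct s m 0

theorem aPass_cell (n2 : String) (x y ct s : Int) (m : List (List String)) (r c : Nat)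
    (hr : r < m.length) (hc : c < (m.getD r []).length) :
    ((aPass n2 x y ct s m).getD r []).getD c "" =
      if c < ((m.headD []) : List String).length ∧ max |(r : Int) - y| |(c : Int) - x| ≤ ct ∧ (m.getD r []).getD c "" = "_"
      then pyRstrip n2 "123456780" ++ PySem.Int.toStr (s - 1)
      else (m.getD r []).getD c "" := by
  have h1 : r < (aPass n2 x y ct s m).length := by rw [aPass_length]; exact hr
  rw [List.getD_eq_getElem (aPass n2 x y ct s m) [] h1]
  rw [List.getD_eq_getElem m [] hr] at hc ⊢
  rw [List.getD_eq_getElem m[r] "" hc]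
  simp only [aPass, List.getElem_mapIdx]
  by_cases hb : y - ct ≤ (r : Int) ∧ (r : Int) < y + ct + 1
  · rw [if_pos hb]
    rw [List.getD_eq_getElem _ "" (by simpa using hc)]
    simp only [List.getElem_mapIdx]
    by_cases hcb : c < ((m.headD []) : List String).length ∧ x - ct ≤ (c : Int) ∧ (c : Int) < x + ct + 1
    · rw [if_pos hcb]
      have hd : max |(r : Int) - y| |(c : Int) - x| ≤ ct := by
        rw [max_le_iff, abs_le, abs_le]; omega
      by_cases hu : m[r][c] = "_"
      · have hcond : c < ((m.headD []) : List String).length ∧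
            max |(r : Int) - y| |(c : Int) - x| ≤ ct ∧ m[r][c] = "_" := ⟨hcb.1, hd, hu⟩
        rw [if_pos hu, if_pos hcond]
      · have hcond : ¬(c < ((m.headD []) : List String).length ∧
            max |(r : Int) - y| |(c : Int) - x| ≤ ct ∧ m[r][c] = "_") := by
          rintro ⟨_, _, h⟩; exact hu h
        rw [if_neg hu, if_neg hcond]
    · have hcond : ¬(c < ((m.headD []) : List String).length ∧
          max |(r : Int) - y| |(c : Int) - x| ≤ ct ∧ m[r][c] = "_") := by
        rintro ⟨hcw, hd, _⟩; rw [max_le_iff, abs_le, abs_le] at hd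
        exact hcb ⟨hcw, by omega, by omega⟩
      rw [if_neg hcb, if_neg hcond]
  · have hcond : ¬(c < ((m.headD []) : List String).length ∧
        max |(r : Int) - y| |(c : Int) - x| ≤ ct ∧ m[r][c] = "_") := by
      rintro ⟨_, hd, _⟩; rw [max_le_iff, abs_le, abs_le] at hd
      exact hb ⟨by omega, by omega⟩
    rw [if_neg hb, if_neg hcond]
    exact List.getD_eq_getElem m[r] "" hc

theorem aLoop_length (n2 : String) (x y : Int) : ∀ (s : Int) (m : List (List String)) (ct : Int),
    (aLoop n2 x y s m ct).length = m.length := by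
  intro s
  induction hn : s.toNat generalizing s with
  | zero => intro m ct; rw [aLoop]; rw [if_pos (by omega)]
  | succ n ih =>
    intro m ct
    rw [aLoop, if_neg (by omega)]
    rw [ih (s - 1) (by omega), aPass_length]

theorem aLoop_getD_length (n2 : String) (x y : Int) : ∀ (s : Int) (m : List (List String)) (ct : Int) (r : Nat),
    ((aLoop n2 x y s m ct).getD r []).length = (m.getD r []).length := by
  intro s
  induction hn : s.toNat generalizing s with
  | zero => intro m ct r; rw [aLoop, if_pos (by omega)]
  | succ n ih =>
    intro m ct r
    rw [aLoop, if_neg (by omega)]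
    rw [ih (s - 1) (by omega), aPass_getD_length]

-- the main characterisation of A's loop
theorem aLoop_cell (n2 : String) (x y : Int) : ∀ (s : Int) (m : List (List String)) (ct : Int) (r c : Nat),
    0 ≤ s → r < m.length → c < (m.getD r []).length →
    ((aLoop n2 x y s m ct).getD r []).getD c "" =
      pvCell n2 x y s ct ((m.headD []) : List String).length r c ((m.getD r []).getD c "") := by
  intro s
  induction hn : s.toNat generalizing s with
  | zero =>
    intro m ct r c hs hr hc
    have : s = 0 := by omega
    subst this
    rw [aLoop, if_pos (by omega)]
    rw [pvCell, if_neg (by rintro ⟨_, _, h, _⟩; omega)]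
  | succ n ih =>
    intro m ct r c hs hr hc
    have hspos : 0 < s := by omega
    rw [aLoop, if_neg (by omega)]
    rw [ih (s - 1) (by omega) _ _ _ _ (by omega) (by rw [aPass_length]; exact hr)
        (by rw [aPass_getD_length]; exact hc)]
    rw [aPass_headD_length, aPass_cell n2 x y ct s m r c hr hc]
    set w := ((m.headD []) : List String).length with hw
    set d := max |(r : Int) - y| |(c : Int) - x| with hdd
    set cell := (m.getD r []).getD c "" with hcell
    have hd0 : 0 ≤ d := le_trans (abs_nonneg _) (le_max_left _ _)
    by_cases h1 : c < w ∧ d ≤ ct ∧ cell = "_"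
    · rw [if_pos h1]
      rw [pvCell, if_neg (by rintro ⟨_, h, _⟩; exact pv_label_ne_underscore n2 (s - 1) h)]
      rw [pvCell, if_pos ⟨h1.1, h1.2.2, hspos, by omega⟩]
      have hmax0 : max 0 (d - ct) = 0 := max_eq_left (by rcases h1 with ⟨_, h, _⟩; omega)
      rw [hmax0]
      norm_num
    · rw [if_neg h1]
      rw [pvCell, pvCell]
      by_cases h2 : c < w ∧ cell = "_" ∧ 0 < s ∧ d ≤ ct + s - 1
      · have hdgt : ct < d := by
          by_contra hle
          exact h1 ⟨h2.1, by omega, h2.2.1⟩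
        rw [if_pos h2, if_pos ⟨h2.1, h2.2.1, by omega, by omega⟩]
        have e1 : max 0 (d - ct) = d - ct := max_eq_right (by omega)
        have e2 : max 0 (d - (ct + 1)) = d - (ct + 1) := max_eq_right (by omega)
        rw [e1, e2]
        have harg : s - 1 - 1 - (d - (ct + 1)) = s - 1 - (d - ct) := by omega
        rw [harg]
      · rw [if_neg h2, if_neg]
        rintro ⟨ha, hb', hc', hd'⟩
        exact h2 ⟨ha, hb', by omega, by omega⟩

-- characterisation of B
theorem alt_length (n2 : String) (x y s : Int) (m : List (List String)) (ct : Int) :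
    (matrix_completion_alt n2 x y s m ct).length = m.length := by
  rw [matrix_completion_alt]
  split <;> simp

theorem alt_getD_length (n2 : String) (x y s : Int) (m : List (List String)) (ct : Int) (r : Nat) :
    ((matrix_completion_alt n2 x y s m ct).getD r []).length = (m.getD r []).length := by
  rw [matrix_completion_alt]
  split
  · by_cases hr : r < m.length
    · rw [List.getD_eq_getElem _ _ (by simp; exact hr), List.getD_eq_getElem _ _ hr]
      simp only [List.getElem_mapIdx]
      split <;> simp
    · rw [List.getD_eq_default _ _ (by simp; omega), List.getD_eq_default _ _ (by omega)]
  · rfl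

theorem alt_cell (n2 : String) (x y s : Int) (m : List (List String)) (ct : Int) (r c : Nat)
    (hs : 0 < s) (hm : m ≠ []) (hr : r < m.length) (hc : c < (m.getD r []).length) :
    ((matrix_completion_alt n2 x y s m ct).getD r []).getD c "" =
      pvCell n2 x y s ct ((m.headD []) : List String).length r c ((m.getD r []).getD c "") := by
  have h1 : r < (matrix_completion_alt n2 x y s m ct).length := by rw [alt_length]; exact hr
  rw [List.getD_eq_getElem (matrix_completion_alt n2 x y s m ct) [] h1]
  rw [List.getD_eq_getElem m [] hr] at hc ⊢
  rw [List.getD_eq_getElem m[r] "" hc]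
  simp only [matrix_completion_alt, if_pos (And.intro hs hm), pvCell]
  simp only [List.getElem_mapIdx]
  by_cases hrb : |(r : Int) - y| ≤ ct + s - 1
  · rw [if_pos hrb]
    rw [List.getD_eq_getElem _ "" (by simpa using hc)]
    simp only [List.getElem_mapIdx]
    by_cases hcw : c < ((m.headD []) : List String).length
    · rw [if_pos hcw]
      by_cases hcb : max |(r : Int) - y| |(c : Int) - x| ≤ ct + s - 1 ∧ m[r][c] = "_"
      · have hcond : c < ((m.headD []) : List String).length ∧ m[r][c] = "_" ∧ 0 < s ∧
            max |(r : Int) - y| |(c : Int) - x| ≤ ct + s - 1 := ⟨hcw, hcb.2, hs, hcb.1⟩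
        rw [if_pos hcb, if_pos hcond]
      · have hcond : ¬(c < ((m.headD []) : List String).length ∧ m[r][c] = "_" ∧ 0 < s ∧
            max |(r : Int) - y| |(c : Int) - x| ≤ ct + s - 1) := by
          rintro ⟨_, h2, _, h4⟩; exact hcb ⟨h4, h2⟩
        rw [if_neg hcb, if_neg hcond]
    · have hcond : ¬(c < ((m.headD []) : List String).length ∧ m[r][c] = "_" ∧ 0 < s ∧
          max |(r : Int) - y| |(c : Int) - x| ≤ ct + s - 1) := by
        rintro ⟨h, _⟩; exact hcw h
      rw [if_neg hcw, if_neg hcond]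
  · have hcond : ¬(c < ((m.headD []) : List String).length ∧ m[r][c] = "_" ∧ 0 < s ∧
        max |(r : Int) - y| |(c : Int) - x| ≤ ct + s - 1) := by
      rintro ⟨_, _, _, hd⟩; exact hrb (le_trans (le_max_left _ _) hd)
    rw [if_neg hrb, if_neg hcond]
    exact List.getD_eq_getElem m[r] "" hc

-- ===== VERDICT (by name: the statement is the Claim_ definition above) =====
theorem matrix_completion_spec : Claim_equal_matrix_completion := by
  intro n2 x y s m ct _hdom hpre
  unfold Spec_matrix_completion matrix_completion
  by_cases hs : 0 < s
  · by_cases hm : m = []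
    · subst hm
      have h1 : (aLoop n2 x y s [] ct).length = 0 := by rw [aLoop_length]; rfl
      rw [List.eq_nil_of_length_eq_zero h1, matrix_completion_alt]
      split
      · rename_i h; exact absurd rfl h.2
      · rfl
    · apply List.ext_getElem
      · rw [aLoop_length, alt_length]
      · intro r h1 h2
        apply List.ext_getElem
        · rw [← List.getD_eq_getElem _ ([] : List String) h1, ← List.getD_eq_getElem _ ([] : List String) h2,
            aLoop_getD_length, alt_getD_length]
        · intro c hc1 hc2
          have hrm : r < m.length := by rw [aLoop_length] at h1; exact h1
          have hcm : c < (m.getD r []).length := by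
            rw [← List.getD_eq_getElem _ ([] : List String) h1, aLoop_getD_length] at hc1
            exact hc1
          have e1 : (aLoop n2 x y s m ct)[r][c] = ((aLoop n2 x y s m ct).getD r []).getD c "" := by
            rw [List.getD_eq_getElem _ ([] : List String) h1, List.getD_eq_getElem]
          have e2 : (matrix_completion_alt n2 x y s m ct)[r][c] = ((matrix_completion_alt n2 x y s m ct).getD r []).getD c "" := by
            rw [List.getD_eq_getElem _ ([] : List String) h2, List.getD_eq_getElem]
          rw [e1, e2, aLoop_cell n2 x y s m ct r c (by omega) hrm hcm,
            alt_cell n2 x y s m ct r c hs hm hrm hcm]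
  · rw [aLoop, if_pos (by omega), matrix_completion_alt, if_neg (by rintro ⟨h, _⟩; omega)]
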